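-- pv_equiv track=rewrite | github.com/anil14349/makeup | app/utils/product_utils.py | group_products_by_category
-- ===== SOURCE A (Python) =====
-- from typing import Dict, List, Any
-- from itertools import groupby
-- from operator import itemgetter
--
-- def categorize_product(product: Dict[str, str]) -> str:
--     """
--     Categorize a product based on its name.
--
--     Args:
--         product: Product dictionary with a 'name' key
--
--     Returns:
--         String category name
--     """
--     name = product["name"].lower()
--
--     # Eye products
--     if any(eye_term in name for eye_term in ["eyeshadow", "eyeliner", "mascara", "eyebrow"]):
--         return "Eye Products"
--
--     # Lip products
--     elif any(lip_term in name for lip_term in ["lipstick", "lip gloss", "lip liner"]):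
--         return "Lip Products"
--
--     # Cheek products
--     elif any(cheek_term in name for cheek_term in ["blush", "bronzer", "highlighter"]):
--         return "Cheek Products"
--
--     # Face products
--     elif any(face_term in name for face_term in ["foundation", "concealer", "powder"]):
--         return "Face Products"
--
--     # Default category
--     else:
--         return "Other Products"
--
-- def group_products_by_category(
--     product_list: List[Dict[str, str]],
--     max_per_category: int = 3,
--     brand_filter: str = None,
--     product_type_filter: str = None
-- ) -> Dict[str, List[Dict[str, str]]]:
--     """
--     Group and filter products by category.
--
--     Args:
--         product_list: List of product dictionaries
--         max_per_category: Maximum number of products per category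
--         brand_filter: Optional brand filter
--         product_type_filter: Optional product type filter
--
--     Returns:
--         Dictionary of categorized and filtered products
--     """
--     # Apply filters first
--     filtered_products = []
--     for item in product_list:
--         if "error" in item:
--             filtered_products.append(item)
--             continue
--
--         # Apply brand filter if specified
--         if brand_filter and item.get("brand") != brand_filter:
--             continue
--
--         # Apply product type filter if specified
--         if product_type_filter and product_type_filter not in item.get("name", "").lower():
--             continue
--
--         # Add category to product
--         product_with_category = item.copy()
--         product_with_category["category"] = categorize_product(item)
--         filtered_products.append(product_with_category)
--
--     # Sort by category
--     filtered_products.sort(key=itemgetter("category", "name"))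
--
--     # Group by category
--     grouped = {}
--     for key, group in groupby(filtered_products, key=itemgetter("category")):
--         # Limit to max_per_category products per category
--         grouped[key] = list(group)[:max_per_category]
--
--     return grouped
-- ===== SOURCE B (Python) =====
-- from operator import itemgetter
--
-- def categorize_product(product):
--     name = product["name"].lower()
--     if any(eye_term in name for eye_term in ["eyeshadow", "eyeliner", "mascara", "eyebrow"]):
--         return "Eye Products"
--     elif any(lip_term in name for lip_term in ["lipstick", "lip gloss", "lip liner"]):
--         return "Lip Products"
--     elif any(cheek_term in name for cheek_term in ["blush", "bronzer", "highlighter"]):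
--         return "Cheek Products"
--     elif any(face_term in name for face_term in ["foundation", "concealer", "powder"]):
--         return "Face Products"
--     else:
--         return "Other Products"
--
-- def group_products_by_category(
--     product_list,
--     max_per_category=3,
--     brand_filter=None,
--     product_type_filter=None,
-- ):
--     # Single pass: bucket each kept product by its category, then emit the
--     # categories in sorted order, sorting each bucket by name and truncating.
--     buckets = {}
--     for item in product_list:
--         if "error" in item:
--             buckets.setdefault(item["category"], []).append(item)
--             continue
--         if brand_filter and item.get("brand") != brand_filter:
--             continue
--         if product_type_filter and product_type_filter not in item.get("name", "").lower():
--             continue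
--         category = categorize_product(item)
--         entry = dict(item)
--         entry["category"] = category
--         buckets.setdefault(category, []).append(entry)
--     return {
--         category: sorted(buckets[category], key=itemgetter("name"))[:max_per_category]
--         for category in sorted(buckets)
--     }
-- ===== Notes on version B (the rewrite author's own statement) =====
-- stated objective: alternative
-- what changed: Replaces A's filter-into-list, global sort by (category,name) and itertools.groupby pass with a single pass that buckets each kept product into a dict by category, then emits categories in sorted order, sorting each bucket by name and truncating it.
import Mathlib
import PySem

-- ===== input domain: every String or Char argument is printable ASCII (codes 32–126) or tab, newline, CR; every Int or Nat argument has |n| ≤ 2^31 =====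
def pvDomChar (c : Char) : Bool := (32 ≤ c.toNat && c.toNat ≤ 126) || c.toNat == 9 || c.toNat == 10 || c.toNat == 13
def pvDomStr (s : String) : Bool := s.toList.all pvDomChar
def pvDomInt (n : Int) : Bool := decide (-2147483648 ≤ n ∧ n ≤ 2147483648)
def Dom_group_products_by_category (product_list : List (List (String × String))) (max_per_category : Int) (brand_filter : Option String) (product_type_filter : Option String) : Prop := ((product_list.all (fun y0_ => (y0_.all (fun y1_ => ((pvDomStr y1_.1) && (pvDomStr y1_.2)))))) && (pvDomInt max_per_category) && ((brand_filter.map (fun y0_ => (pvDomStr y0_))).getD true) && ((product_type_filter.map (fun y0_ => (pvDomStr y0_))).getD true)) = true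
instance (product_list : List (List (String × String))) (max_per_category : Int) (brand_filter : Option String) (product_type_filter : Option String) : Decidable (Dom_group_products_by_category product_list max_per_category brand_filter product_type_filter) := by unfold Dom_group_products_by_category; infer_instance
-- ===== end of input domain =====

-- B replaces A's global sort + itertools.groupby with one bucketing pass over the products
-- followed by a per-category sort; same return value on every input admitted by Pre_ (objective: alternative).

-- ===== PORT A =====
-- shared module helper categorize_product (used by both Pythons)
def pvCategorize (d : PySem.Dict String String) : String :=
  -- product["name"]: Pre_ guarantees the key is present, so getD is exact
  let nm := PySem.Str.lower (d.getD "name" "")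
  if (["eyeshadow", "eyeliner", "mascara", "eyebrow"].any fun t => PySem.Str.isIn t nm) then
    "Eye Products"
  else if (["lipstick", "lip gloss", "lip liner"].any fun t => PySem.Str.isIn t nm) then
    "Lip Products"
  else if (["blush", "bronzer", "highlighter"].any fun t => PySem.Str.isIn t nm) then
    "Cheek Products"
  else if (["foundation", "concealer", "powder"].any fun t => PySem.Str.isIn t nm) then
    "Face Products"
  else
    "Other Products"

-- itertools.groupby(xs, key=itemgetter("category")) on the sorted list, as consumed by A's loop
-- (item["category"]: Pre_ guarantees the key, so getD is exact)
def pvRuns : List (PySem.Dict String String) → List (String × List (PySem.Dict String String))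
  | [] => []
  | x :: xs =>
    let c := x.getD "category" ""
    (c, x :: xs.takeWhile (fun y => y.getD "category" "" == c)) ::
      pvRuns (xs.dropWhile (fun y => y.getD "category" "" == c))
  termination_by l => l.length
  decreasing_by
    have h := List.length_dropWhile_le (fun y => y.getD "category" "" == x.getD "category" "") xs
    simp only [List.length_cons]
    omega

def group_products_by_category (product_list : List (List (String × String))) (max_per_category : Int) (brand_filter : Option String) (product_type_filter : Option String) : List (String × List (List (String × String))) :=
  let filtered := product_list.foldl (fun acc item =>
    let d := PySem.Dict.ofList item
    if d.contains "error" then acc ++ [d]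
    else if (brand_filter.elim false (fun b => b != "" && d.get? "brand" != some b)) then acc
    else if (product_type_filter.elim false
        (fun t => t != "" && !(PySem.Str.isIn t (PySem.Str.lower (d.getD "name" ""))))) then acc
    else acc ++ [d.insert "category" (pvCategorize d)]) []
  let sortedF := PySem.List.sorted2 filtered
    (fun d => d.getD "category" "") (fun d => d.getD "name" "") false
  let grouped := (pvRuns sortedF).foldl
    (fun g r => g.insert r.1 (PySem.List.slice r.2 none (some max_per_category))) PySem.Dict.empty
  grouped.items.map fun p => (p.1, p.2.map PySem.Dict.items)

-- ===== PORT B =====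
def group_products_by_category_alt (product_list : List (List (String × String))) (max_per_category : Int) (brand_filter : Option String) (product_type_filter : Option String) : List (String × List (List (String × String))) :=
  let buckets := product_list.foldl (fun bk item =>
    let d := PySem.Dict.ofList item
    if d.contains "error" then
      -- item["category"]: Pre_ guarantees the key, so getD is exact
      bk.modify (d.getD "category" "") [] (fun g => g ++ [d])
    else if (brand_filter.elim false (fun b => b != "" && d.get? "brand" != some b)) then bk
    else if (product_type_filter.elim false
        (fun t => t != "" && !(PySem.Str.isIn t (PySem.Str.lower (d.getD "name" ""))))) then bk
    else
      let c := pvCategorize d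
      bk.modify c [] (fun g => g ++ [d.insert "category" c])) PySem.Dict.empty
  (PySem.List.sorted buckets.keys (fun k => k) false).map fun c =>
    -- buckets[c]: c is drawn from buckets' keys, so getD is exact
    (c, (PySem.List.slice (PySem.List.sorted (buckets.getD c []) (fun d => d.getD "name" "") false)
          none (some max_per_category)).map PySem.Dict.items)

-- ===== PRECONDITION & SPEC =====
-- an item certainly discarded by A's filters even without a "name" key
def pvSurelySkipped (d : PySem.Dict String String) (brand_filter : Option String) (product_type_filter : Option String) : Bool :=
  (brand_filter.elim false (fun b => b != "" && d.get? "brand" != some b)) ||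
  (product_type_filter.elim false (fun t => t != ""))

-- Pre_ excludes exactly the inputs on which A raises KeyError: an item carrying an "error" key
-- must also carry "category" and "name" (A sorts it by those keys), and any other item that the
-- filters do not certainly discard must carry a "name" key (categorize_product reads it).
def Pre_group_products_by_category (product_list : List (List (String × String))) (max_per_category : Int) (brand_filter : Option String) (product_type_filter : Option String) : Prop :=
  ∀ item ∈ product_list,
    ((PySem.Dict.ofList item).contains "error" = true →
      (PySem.Dict.ofList item).contains "category" = true ∧
      (PySem.Dict.ofList item).contains "name" = true) ∧
    ((PySem.Dict.ofList item).contains "error" = false →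
      ((PySem.Dict.ofList item).contains "name" = true ∨
        pvSurelySkipped (PySem.Dict.ofList item) brand_filter product_type_filter = true))
instance (product_list : List (List (String × String))) (max_per_category : Int) (brand_filter : Option String) (product_type_filter : Option String) : Decidable (Pre_group_products_by_category product_list max_per_category brand_filter product_type_filter) := by unfold Pre_group_products_by_category; infer_instance

def pvWitness_group_products_by_category : (List (List (String × String))) × Int × Option String × Option String :=
  ([[("name", "lipstick red")], [("name", "blush A"), ("brand", "B")]], 3, none, none)

def Spec_group_products_by_category (product_list : List (List (String × String))) (max_per_category : Int) (brand_filter : Option String) (product_type_filter : Option String) (out : List (String × List (List (String × String)))) : Prop := out = group_products_by_category_alt product_list max_per_category brand_filter product_type_filter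
instance (product_list : List (List (String × String))) (max_per_category : Int) (brand_filter : Option String) (product_type_filter : Option String) (out : List (String × List (List (String × String)))) : Decidable (Spec_group_products_by_category product_list max_per_category brand_filter product_type_filter out) := by unfold Spec_group_products_by_category; infer_instance

-- ===== CLAIM (what is proved, stated in full; the proofs are below) =====
def Claim_equal_group_products_by_category : Prop := ∀ (product_list : List (List (String × String))) (max_per_category : Int) (brand_filter : Option String) (product_type_filter : Option String), Dom_group_products_by_category product_list max_per_category brand_filter product_type_filter → Pre_group_products_by_category product_list max_per_category brand_filter product_type_filter → Spec_group_products_by_category product_list max_per_category brand_filter product_type_filter (group_products_by_category product_list max_per_category brand_filter product_type_filter)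

-- ===== LEMMAS AND PROOFS =====


-- abbreviations for the two sort keys and comparison functions that appear in both ports
def pvCat (d : PySem.Dict String String) : String := d.getD "category" ""
def pvNam (d : PySem.Dict String String) : String := d.getD "name" ""
def pvLt2 (a b : PySem.Dict String String) : Bool :=
  decide (pvCat a < pvCat b) || (!decide (pvCat b < pvCat a) && decide (pvNam a < pvNam b))
def pvLt1 (a b : PySem.Dict String String) : Bool := decide (pvNam a < pvNam b)
def pvLe2 (a b : PySem.Dict String String) : Prop :=
  pvCat a < pvCat b ∨ (pvCat a = pvCat b ∧ pvNam a ≤ pvNam b)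

theorem pvLe2_of_lt2 {a b : PySem.Dict String String} (h : pvLt2 a b = true) : pvLe2 a b := by
  by_cases h1 : pvCat a < pvCat b
  · exact Or.inl h1
  by_cases h2 : pvCat b < pvCat a
  · exact absurd h (by simp [pvLt2, h1, h2])
  by_cases h3 : pvNam a < pvNam b
  · exact Or.inr ⟨le_antisymm (not_lt.mp h2) (not_lt.mp h1), h3.le⟩
  · exact absurd h (by simp [pvLt2, h1, h2, h3])

theorem pvLe2_of_not_lt2 {a b : PySem.Dict String String} (h : pvLt2 a b = false) : pvLe2 b a := by
  by_cases h1 : pvCat b < pvCat a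
  · exact Or.inl h1
  by_cases h2 : pvCat a < pvCat b
  · exact absurd h (by simp [pvLt2, h2])
  by_cases h3 : pvNam a < pvNam b
  · exact absurd h (by simp [pvLt2, h1, h3])
  · exact Or.inr ⟨le_antisymm (not_lt.mp h2) (not_lt.mp h1), not_lt.mp h3⟩

theorem pvLe2_catle {a b : PySem.Dict String String} (h : pvLe2 a b) : pvCat a ≤ pvCat b := by
  rcases h with h | ⟨h, _⟩
  · exact le_of_lt h
  · exact le_of_eq h

theorem pvLe2_trans {a b c : PySem.Dict String String} (h1 : pvLe2 a b) (h2 : pvLe2 b c) :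
    pvLe2 a c := by
  rcases h1 with h1 | ⟨e1, n1⟩ <;> rcases h2 with h2 | ⟨e2, n2⟩
  · exact Or.inl (lt_trans h1 h2)
  · exact Or.inl (by rw [← e2]; exact h1)
  · exact Or.inl (by rw [e1]; exact h2)
  · exact Or.inr ⟨e1.trans e2, le_trans n1 n2⟩

theorem pvInsertBy_cons (before : PySem.Dict String String → PySem.Dict String String → Bool)
    (x y : PySem.Dict String String) (ys : List (PySem.Dict String String)) :
    PySem.List.insertBy before x (y :: ys) =
      if before x y then x :: y :: ys else y :: PySem.List.insertBy before x ys := rfl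

theorem pvInsertBy_front {before : PySem.Dict String String → PySem.Dict String String → Bool}
    {x : PySem.Dict String String} {l : List (PySem.Dict String String)}
    (h : ∀ z ∈ l, before x z = true) :
    PySem.List.insertBy before x l = x :: l := by
  cases l with
  | nil => rfl
  | cons y ys => rw [pvInsertBy_cons, if_pos (h y (List.mem_cons_self ..))]

theorem pvPairwise_insertBy {x : PySem.Dict String String} {l : List (PySem.Dict String String)}
    (h : l.Pairwise pvLe2) : (PySem.List.insertBy pvLt2 x l).Pairwise pvLe2 := by
  induction l with
  | nil => simp [PySem.List.insertBy]
  | cons y ys ih =>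
    obtain ⟨hy, hys⟩ := List.pairwise_cons.mp h
    rw [pvInsertBy_cons]
    cases hb : pvLt2 x y with
    | true =>
      rw [if_pos rfl]
      refine List.pairwise_cons.mpr ⟨?_, h⟩
      intro z hz
      rcases List.mem_cons.mp hz with rfl | hz
      · exact pvLe2_of_lt2 hb
      · exact pvLe2_trans (pvLe2_of_lt2 hb) (hy z hz)
    | false =>
      rw [if_neg Bool.false_ne_true]
      refine List.pairwise_cons.mpr ⟨?_, ih hys⟩
      intro z hz
      rcases (PySem.List.mem_insertBy pvLt2 x z ys).mp hz with rfl | hz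
      · exact pvLe2_of_not_lt2 hb
      · exact hy z hz

theorem pvFilter_insertBy (c : String) {x : PySem.Dict String String} :
    ∀ {l : List (PySem.Dict String String)}, l.Pairwise pvLe2 →
    (PySem.List.insertBy pvLt2 x l).filter (fun y => pvCat y == c) =
      if pvCat x = c then PySem.List.insertBy pvLt1 x (l.filter (fun y => pvCat y == c))
      else l.filter (fun y => pvCat y == c) := by
  intro l
  induction l with
  | nil =>
    intro _
    by_cases hc : pvCat x = c <;>
      simp [PySem.List.insertBy, List.filter, hc]
  | cons y ys ih =>
    intro h
    obtain ⟨hy, hys⟩ := List.pairwise_cons.mp h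
    rw [pvInsertBy_cons]
    cases hb : pvLt2 x y with
    | true =>
      rw [if_pos rfl]
      have hOR : pvCat x < pvCat y ∨ (¬ pvCat y < pvCat x ∧ pvNam x < pvNam y) := by
        simpa [pvLt2] using hb
      by_cases hc : pvCat x = c
      · rw [if_pos hc]
        have hfront : ∀ z ∈ (y :: ys).filter (fun y => pvCat y == c), pvLt1 x z = true := by
          intro z hz
          obtain ⟨hz1, hz2⟩ := List.mem_filter.mp hz
          have hzc : pvCat z = c := by simpa using hz2
          rcases List.mem_cons.mp hz1 with rfl | hz1
          · rcases hOR with hb' | ⟨_, hb2⟩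
            · exact absurd hb' (by rw [hzc, hc]; exact lt_irrefl c)
            · simpa [pvLt1] using hb2
          · have hyz := hy z hz1
            rcases hOR with hb' | ⟨hb1, hb2⟩
            · exfalso
              rcases hyz with hyz | ⟨hyz, _⟩
              · rw [hzc, ← hc] at hyz
                exact lt_asymm hb' hyz
              · rw [hyz, hzc, ← hc] at hb'
                exact lt_irrefl _ hb'
            · rcases hyz with hyz | ⟨_, hyz⟩
              · exact absurd (by rw [hzc, ← hc] at hyz; exact hyz) hb1
              · simp only [pvLt1, decide_eq_true_eq]
                exact lt_of_lt_of_le hb2 hyz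
        rw [pvInsertBy_front hfront, List.filter_cons_of_pos (by simpa using hc)]
      · rw [if_neg hc, List.filter_cons_of_neg (by simpa using hc)]
    | false =>
      rw [if_neg Bool.false_ne_true]
      by_cases hpy : pvCat y = c
      · rw [List.filter_cons_of_pos (by simpa using hpy),
            List.filter_cons_of_pos (by simpa using hpy), ih hys]
        by_cases hc : pvCat x = c
        · rw [if_pos hc, if_pos hc, pvInsertBy_cons, if_neg]
          have hcc : pvCat x = pvCat y := hc.trans hpy.symm
          have hn : pvLt1 x y = false := by
            have := hb
            simp only [pvLt2, hcc, lt_irrefl, decide_false, Bool.false_or, Bool.not_false,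
              Bool.true_and] at this
            simpa [pvLt1] using this
          simp [hn]
        · rw [if_neg hc, if_neg hc]
      · rw [List.filter_cons_of_neg (by simpa using hpy),
            List.filter_cons_of_neg (by simpa using hpy), ih hys]

theorem pvFold_pairwise (xs : List (PySem.Dict String String)) :
    ∀ acc, acc.Pairwise pvLe2 →
      (xs.foldl (fun a x => PySem.List.insertBy pvLt2 x a) acc).Pairwise pvLe2 := by
  induction xs with
  | nil => intro acc h; simpa using h
  | cons x xs ih =>
    intro acc h
    rw [List.foldl_cons]
    exact ih _ (pvPairwise_insertBy h)

theorem pvFold_filter (c : String) (xs : List (PySem.Dict String String)) :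
    ∀ acc, acc.Pairwise pvLe2 →
      (xs.foldl (fun a x => PySem.List.insertBy pvLt2 x a) acc).filter (fun y => pvCat y == c) =
        (xs.filter (fun y => pvCat y == c)).foldl (fun a x => PySem.List.insertBy pvLt1 x a)
          (acc.filter (fun y => pvCat y == c)) := by
  induction xs with
  | nil => intro acc _; simp
  | cons x xs ih =>
    intro acc h
    rw [List.foldl_cons, ih _ (pvPairwise_insertBy h), pvFilter_insertBy c h]
    by_cases hc : pvCat x = c
    · rw [if_pos hc, List.filter_cons_of_pos (by simpa using hc), List.foldl_cons]
    · rw [if_neg hc, List.filter_cons_of_neg (by simpa using hc)]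

theorem pvDropWhile_gt (x : PySem.Dict String String) :
    ∀ (xs : List (PySem.Dict String String)),
      xs.Pairwise (fun a b => pvCat a ≤ pvCat b) → (∀ y ∈ xs, pvCat x ≤ pvCat y) →
      ∀ y ∈ xs.dropWhile (fun y => pvCat y == pvCat x), pvCat x < pvCat y := by
  intro xs
  induction xs with
  | nil => intro _ _ y hy; simp at hy
  | cons z zs ih =>
    intro hp hb y hy
    obtain ⟨hz, hzs⟩ := List.pairwise_cons.mp hp
    rw [List.dropWhile_cons] at hy
    by_cases hzx : pvCat z = pvCat x
    · rw [if_pos (by simpa using hzx)] at hy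
      exact ih hzs (fun y hy => hb y (List.mem_cons_of_mem _ hy)) y hy
    · rw [if_neg (by simpa using hzx)] at hy
      have hxz : pvCat x < pvCat z :=
        lt_of_le_of_ne (hb z (List.mem_cons_self ..)) (fun h => hzx h.symm)
      rcases List.mem_cons.mp hy with rfl | hy
      · exact hxz
      · exact lt_of_lt_of_le hxz (hz y hy)

theorem pvRuns_main :
    ∀ S : List (PySem.Dict String String),
    S.Pairwise (fun a b => pvCat a ≤ pvCat b) →
    ((pvRuns S).map Prod.fst).Pairwise (· < ·) ∧
    (∀ c, c ∈ (pvRuns S).map Prod.fst ↔ c ∈ S.map pvCat) ∧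
    (∀ r ∈ pvRuns S, r.2 = S.filter (fun y => pvCat y == r.1)) := by
  intro S
  induction S using pvRuns.induct with
  | case1 => intro _; simp [pvRuns]
  | case2 x xs _c ih =>
    intro h
    obtain ⟨hx, hxs⟩ := List.pairwise_cons.mp h
    have hrw : pvRuns (x :: xs) =
        (pvCat x, x :: xs.takeWhile (fun y => y.getD "category" "" == x.getD "category" "")) ::
          pvRuns (xs.dropWhile (fun y => y.getD "category" "" == x.getD "category" "")) := by
      rw [pvRuns]
      rfl
    have ht : ∀ z ∈ xs.takeWhile (fun y => y.getD "category" "" == x.getD "category" ""),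
        pvCat z = pvCat x := by
      intro z hz
      have := List.mem_takeWhile_imp hz
      simpa [pvCat] using this
    have hr : ∀ z ∈ xs.dropWhile (fun y => y.getD "category" "" == x.getD "category" ""),
        pvCat x < pvCat z := fun z hz => pvDropWhile_gt x xs hxs hx z hz
    have hrp : (xs.dropWhile (fun y => y.getD "category" "" == x.getD "category" "")).Pairwise
        (fun a b => pvCat a ≤ pvCat b) :=
      List.Pairwise.sublist (List.dropWhile_sublist _) hxs
    obtain ⟨ih1, ih2, ih3⟩ := ih hrp
    have hxsplit : xs = xs.takeWhile (fun y => y.getD "category" "" == x.getD "category" "") ++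
        xs.dropWhile (fun y => y.getD "category" "" == x.getD "category" "") :=
      (List.takeWhile_append_dropWhile).symm
    have hfind : ∀ c, pvCat x < c →
        List.filter (fun y => pvCat y == c) (x :: xs) =
          (xs.dropWhile (fun y => y.getD "category" "" == x.getD "category" "")).filter
            (fun y => pvCat y == c) := by
      intro c hcgt
      rw [List.filter_cons_of_neg (by simp only [beq_iff_eq]; exact ne_of_lt hcgt)]
      conv_lhs => rw [hxsplit]
      rw [List.filter_append]
      have hnil : (xs.takeWhile (fun y => y.getD "category" "" == x.getD "category" "")).filter
          (fun y => pvCat y == c) = [] := by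
        refine List.filter_eq_nil_iff.mpr ?_
        intro z hz
        simp only [beq_iff_eq]
        rw [ht z hz]
        exact ne_of_lt hcgt
      rw [hnil, List.nil_append]
    have hself : List.filter (fun y => pvCat y == pvCat x) (x :: xs) =
        x :: xs.takeWhile (fun y => y.getD "category" "" == x.getD "category" "") := by
      rw [List.filter_cons_of_pos (by simp)]
      conv_lhs => rw [hxsplit]
      rw [List.filter_append]
      have h1 : (xs.takeWhile (fun y => y.getD "category" "" == x.getD "category" "")).filter
          (fun y => pvCat y == pvCat x) =
          xs.takeWhile (fun y => y.getD "category" "" == x.getD "category" "") := by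
        refine List.filter_eq_self.mpr ?_
        intro z hz
        simp [ht z hz]
      have h2 : (xs.dropWhile (fun y => y.getD "category" "" == x.getD "category" "")).filter
          (fun y => pvCat y == pvCat x) = [] := by
        refine List.filter_eq_nil_iff.mpr ?_
        intro z hz
        simp only [beq_iff_eq]
        exact ne_of_gt (hr z hz)
      rw [h1, h2, List.append_nil]
    rw [hrw]
    refine ⟨?_, ?_, ?_⟩
    · simp only [List.map_cons]
      refine List.pairwise_cons.mpr ⟨?_, ih1⟩
      intro c hc
      obtain ⟨z, hz, rfl⟩ := List.mem_map.mp ((ih2 c).mp hc)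
      exact hr z hz
    · intro c
      simp only [List.map_cons, List.mem_cons]
      constructor
      · rintro (rfl | hc)
        · exact Or.inl rfl
        · right
          have hcmem := (ih2 c).mp hc
          rw [hxsplit, List.map_append]
          exact List.mem_append_right _ hcmem
      · rintro (rfl | hc)
        · exact Or.inl rfl
        · rw [hxsplit, List.map_append] at hc
          rcases List.mem_append.mp hc with hc | hc
          · obtain ⟨z, hz, rfl⟩ := List.mem_map.mp hc
            exact Or.inl (ht z hz)
          · exact Or.inr ((ih2 c).mpr hc)
    · intro r hrr
      rcases List.mem_cons.mp hrr with rfl | hrr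
      · exact hself.symm
      · have h2 := ih3 r hrr
        have hmemfst : r.1 ∈ (pvRuns (xs.dropWhile
            (fun y => y.getD "category" "" == x.getD "category" ""))).map Prod.fst :=
          List.mem_map_of_mem hrr
        obtain ⟨z, hz, hzeq⟩ := List.mem_map.mp ((ih2 r.1).mp hmemfst)
        have hgt : pvCat x < r.1 := hzeq ▸ hr z hz
        rw [h2, hfind r.1 hgt]

theorem pvFoldl_elim_filterMap {α β γ : Type} (g : α → Option β) (f : γ → β → γ) :
    ∀ (l : List α) (init : γ),
      l.foldl (fun s x => (g x).elim s (fun y => f s y)) init =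
        (l.filterMap g).foldl f init := by
  intro l
  induction l with
  | nil => intro init; simp
  | cons x xs ih =>
    intro init
    rw [List.foldl_cons, List.filterMap_cons]
    cases g x with
    | none => exact ih init
    | some y => rw [List.foldl_cons]; exact ih (f init y)

-- the per-item processing both Pythons share: error items pass through, filtered items vanish,
-- kept items get their category added
def pvProc (brand_filter product_type_filter : Option String) (item : List (String × String)) :
    Option (PySem.Dict String String) :=
  let d := PySem.Dict.ofList item
  if d.contains "error" then some d
  else if (brand_filter.elim false (fun b => b != "" && d.get? "brand" != some b)) then none
  else if (product_type_filter.elim false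
      (fun t => t != "" && !(PySem.Str.isIn t (PySem.Str.lower (d.getD "name" ""))))) then none
  else some (d.insert "category" (pvCategorize d))

theorem pvBuckets_getD (F : List (PySem.Dict String String)) (c : String) :
    ∀ d : PySem.Dict String (List (PySem.Dict String String)),
      (F.foldl (fun bk p => bk.modify (pvCat p) [] (fun g => g ++ [p])) d).getD c [] =
        d.getD c [] ++ F.filter (fun p => pvCat p == c) := by
  induction F with
  | nil => intro d; simp
  | cons p F ih =>
    intro d
    rw [List.foldl_cons, ih]
    rw [show PySem.Dict.modify d (pvCat p) [] (fun g => g ++ [p]) =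
          d.insert (pvCat p) (d.getD (pvCat p) [] ++ [p]) from rfl]
    by_cases hc : pvCat p = c
    · rw [List.filter_cons_of_pos (by simpa using hc), PySem.Dict.getD_insert,
        if_pos hc.symm, hc, List.append_assoc]
      rfl
    · rw [List.filter_cons_of_neg (by simpa using hc), PySem.Dict.getD_insert,
        if_neg (fun hcc => hc hcc.symm)]

theorem pvBuckets_keys (F : List (PySem.Dict String String)) :
    ∀ d : PySem.Dict String (List (PySem.Dict String String)),
      (F.foldl (fun bk p => bk.modify (pvCat p) [] (fun g => g ++ [p])) d).keys =
        PySem.Set.update d.keys (F.map pvCat) := by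
  induction F with
  | nil => intro d; simp [PySem.Set.update]
  | cons p F ih =>
    intro d
    rw [List.foldl_cons, ih, List.map_cons]
    rw [show PySem.Dict.modify d (pvCat p) [] (fun g => g ++ [p]) =
          d.insert (pvCat p) (d.getD (pvCat p) [] ++ [p]) from rfl]
    have hkeys : (d.insert (pvCat p) (d.getD (pvCat p) [] ++ [p])).keys =
        PySem.Set.add d.keys (pvCat p) := by
      cases hck : d.contains (pvCat p) with
      | true =>
        rw [PySem.Dict.keys_insert_of_contains _ _ hck,
            PySem.Set.add_of_mem ((PySem.Dict.contains_iff_mem_keys d _).mp hck)]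
      | false =>
        rw [PySem.Dict.keys_insert_of_not_contains _ _ hck, PySem.Set.add_of_not_mem]
        intro hmem
        rw [(PySem.Dict.contains_iff_mem_keys d _).mpr hmem] at hck
        exact Bool.noConfusion hck
    rw [hkeys]
    rfl

set_option maxHeartbeats 1000000 in
theorem pvMain (pl : List (List (String × String))) (mpc : Int)
    (bf : Option String) (ptf : Option String) :
    group_products_by_category pl mpc bf ptf =
      group_products_by_category_alt pl mpc bf ptf := by
  have hstepA : (fun (acc : List (PySem.Dict String String)) (item : List (String × String)) =>
      if (PySem.Dict.ofList item).contains "error" then acc ++ [PySem.Dict.ofList item]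
      else if (bf.elim false (fun b => b != "" && (PySem.Dict.ofList item).get? "brand" != some b)) then acc
      else if (ptf.elim false (fun t => t != "" &&
          !(PySem.Str.isIn t (PySem.Str.lower ((PySem.Dict.ofList item).getD "name" ""))))) then acc
      else acc ++ [(PySem.Dict.ofList item).insert "category" (pvCategorize (PySem.Dict.ofList item))]) =
      (fun acc item => (pvProc bf ptf item).elim acc (fun y => acc ++ [y])) := by
    funext acc item
    simp only [pvProc]
    split_ifs <;> rfl
  have hstepB : (fun (bk : PySem.Dict String (List (PySem.Dict String String))) (item : List (String × String)) =>
      if (PySem.Dict.ofList item).contains "error" then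
        bk.modify ((PySem.Dict.ofList item).getD "category" "") []
          (fun g => g ++ [PySem.Dict.ofList item])
      else if (bf.elim false (fun b => b != "" && (PySem.Dict.ofList item).get? "brand" != some b)) then bk
      else if (ptf.elim false (fun t => t != "" &&
          !(PySem.Str.isIn t (PySem.Str.lower ((PySem.Dict.ofList item).getD "name" ""))))) then bk
      else bk.modify (pvCategorize (PySem.Dict.ofList item)) []
        (fun g => g ++ [(PySem.Dict.ofList item).insert "category"
          (pvCategorize (PySem.Dict.ofList item))])) =
      (fun bk item => (pvProc bf ptf item).elim bk
        (fun p => PySem.Dict.modify bk (pvCat p) [] (fun g => g ++ [p]))) := by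
    funext bk item
    have hkey : pvCat ((PySem.Dict.ofList item).insert "category"
        (pvCategorize (PySem.Dict.ofList item))) = pvCategorize (PySem.Dict.ofList item) := by
      simp [pvCat]
    simp only [pvProc]
    split_ifs
    · rfl
    · rfl
    · rfl
    · simp only [Option.elim]
      rw [hkey]
  simp only [group_products_by_category, group_products_by_category_alt]
  rw [hstepA, hstepB]
  rw [pvFoldl_elim_filterMap (pvProc bf ptf) (fun s y => s ++ [y]) pl []]
  rw [pvFoldl_elim_filterMap (pvProc bf ptf)
      (fun bk p => PySem.Dict.modify bk (pvCat p) [] (fun g => g ++ [p])) pl PySem.Dict.empty]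
  rw [PySem.List.foldl_append_singleton_eq_self, List.nil_append]
  set F := pl.filterMap (pvProc bf ptf) with hF
  set S := PySem.List.sorted2 F (fun d => d.getD "category" "") (fun d => d.getD "name" "") false
    with hSdef
  have hS : S = F.foldl (fun acc x => PySem.List.insertBy pvLt2 x acc) [] := rfl
  have hPw : S.Pairwise pvLe2 := by rw [hS]; exact pvFold_pairwise F [] List.Pairwise.nil
  have hCat : S.Pairwise (fun a b => pvCat a ≤ pvCat b) := hPw.imp (fun hab => pvLe2_catle hab)
  obtain ⟨hlt, hmem, hsnd⟩ := pvRuns_main S hCat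
  have hnodup : ((pvRuns S).map Prod.fst).Nodup := hlt.imp (fun hab => ne_of_lt hab)
  have hitems := PySem.Dict.items_foldl_insert_fresh (pvRuns S) Prod.fst
      (fun r => PySem.List.slice r.2 none (some mpc)) PySem.Dict.empty
      (fun r _ => PySem.Dict.contains_empty _) hnodup
  rw [hitems]
  rw [show (PySem.Dict.empty : PySem.Dict String (List (PySem.Dict String String))).items = []
      from rfl, List.nil_append]
  beta_reduce
  have hAlist : ((pvRuns S).map (fun r => (r.1, PySem.List.slice r.2 none (some mpc)))).map
      (fun p => (p.1, p.2.map PySem.Dict.items)) =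
      ((pvRuns S).map Prod.fst).map (fun c =>
        (c, (PySem.List.slice (S.filter (fun y => pvCat y == c)) none (some mpc)).map
          PySem.Dict.items)) := by
    rw [List.map_map, List.map_map]
    refine List.map_congr_left ?_
    intro r hr
    simp only [Function.comp_apply]
    rw [hsnd r hr]
  rw [hAlist]
  have hkeys : (F.foldl (fun bk p => PySem.Dict.modify bk (pvCat p) [] (fun g => g ++ [p]))
      PySem.Dict.empty).keys = PySem.Set.ofList (F.map pvCat) := by
    rw [pvBuckets_keys, PySem.Dict.keys_empty, PySem.Set.ofList_eq_foldl]
    rfl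
  have hgetD : ∀ c, (F.foldl (fun bk p => PySem.Dict.modify bk (pvCat p) [] (fun g => g ++ [p]))
      PySem.Dict.empty).getD c [] = F.filter (fun p => pvCat p == c) := by
    intro c
    rw [pvBuckets_getD, PySem.Dict.getD_empty, List.nil_append]
  have hSF : ∀ a, a ∈ S.map pvCat ↔ a ∈ F.map pvCat := by
    intro a
    exact (List.Perm.map pvCat (PySem.List.sorted2_perm F _ _ false)).mem_iff
  have hkeysort : PySem.List.sorted (PySem.Set.ofList (F.map pvCat)) (fun k => k) false =
      (pvRuns S).map Prod.fst := by
    refine PySem.List.sorted_eq_of_perm_of_pairwise_lt _ _ _ ?_ ?_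
    · refine List.perm_of_nodup_nodup_toFinset_eq hnodup (PySem.Set.nodup_ofList _) ?_
      ext a
      simp only [List.mem_toFinset]
      rw [hmem a, hSF a, PySem.Set.mem_ofList]
    · exact hlt
  have hbsort : ∀ c, PySem.List.sorted (F.filter (fun p => pvCat p == c))
      (fun d => d.getD "name" "") false = S.filter (fun y => pvCat y == c) := by
    intro c
    have h2 := pvFold_filter c F [] List.Pairwise.nil
    simp only [List.filter_nil] at h2
    rw [show PySem.List.sorted (F.filter (fun p => pvCat p == c)) (fun d => d.getD "name" "") false
        = (F.filter (fun p => pvCat p == c)).foldl (fun a x => PySem.List.insertBy pvLt1 x a) []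
        from rfl, ← h2, ← hS]
  rw [hkeys]
  simp only [hgetD, hbsort]
  rw [hkeysort]

-- ===== VERDICT (by name: the statement is the Claim_ definition above) =====
theorem group_products_by_category_spec : Claim_equal_group_products_by_category := by
  intro pl mpc bf ptf _ _
  exact pvMain pl mpc bf ptf
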